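-- pv_equiv track=rewrite | github.com/DarkOnGithub/oxide | scripts/analyze_oxz_archive.py | _varint_size
-- ===== SOURCE A (Python) =====
-- def _varint_size(value: int) -> int:
--     if value < 0:
--         raise ValueError("varint value must be non-negative")
--     size = 1
--     while value >= 0x80:
--         value >>= 7
--         size += 1
--     return size
-- ===== SOURCE B (Python) =====
-- def _varint_size(value: int) -> int:
--     if value < 0:
--         raise ValueError("varint value must be non-negative")
--     return max(1, (value.bit_length() + 6) // 7)
-- ===== Notes on version B (the rewrite author's own statement) =====
-- stated objective: simpler
-- what changed: Replaces the shifting loop with a closed form over bit_length that computes the number of seven-bit groups directly.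
import Mathlib
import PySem

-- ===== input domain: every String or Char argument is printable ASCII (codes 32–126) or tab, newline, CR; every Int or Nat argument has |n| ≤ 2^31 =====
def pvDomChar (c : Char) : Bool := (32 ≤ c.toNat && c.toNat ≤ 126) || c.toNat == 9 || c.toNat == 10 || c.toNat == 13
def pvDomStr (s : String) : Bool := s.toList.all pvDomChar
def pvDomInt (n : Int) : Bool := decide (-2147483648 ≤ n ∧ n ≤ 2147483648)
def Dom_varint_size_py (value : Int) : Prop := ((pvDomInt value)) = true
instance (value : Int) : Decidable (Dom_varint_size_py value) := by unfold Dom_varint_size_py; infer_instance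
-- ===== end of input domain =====

-- B replaces A's 7-bit shifting loop by the closed form max(1, (bit_length+6)//7); simpler, same values.

-- ===== PORT A =====
-- the while loop: value >>= 7 on a non-negative int is floor division by 128 (Int `/` = ediv, exact for non-negative operands)
def varintLoopA (value : Int) (size : Int) : Int :=
  if 128 ≤ value then varintLoopA (value / 128) (size + 1) else size
  termination_by value.toNat
  decreasing_by omega

def varint_size_py (value : Int) : Int := varintLoopA value 1

-- ===== PORT B =====
-- Python's int.bit_length for non-negative n: 0 for 0, else log2 n + 1
def pyBitLength (value : Int) : Nat :=
  if value.toNat = 0 then 0 else Nat.log2 value.toNat + 1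

def varint_size_py_alt (value : Int) : Int :=
  max 1 (((pyBitLength value + 6) / 7 : Nat) : Int)

-- ===== PRECONDITION & SPEC =====
-- A raises ValueError on negative values (and B does too); Pre_ admits exactly the non-negative inputs.
def Pre_varint_size_py (value : Int) : Prop := 0 ≤ value
instance (value : Int) : Decidable (Pre_varint_size_py value) := by unfold Pre_varint_size_py; infer_instance
def pvWitness_varint_size_py : Int := (300)

def Spec_varint_size_py (value : Int) (out : Int) : Prop := out = varint_size_py_alt value
instance (value : Int) (out : Int) : Decidable (Spec_varint_size_py value out) := by unfold Spec_varint_size_py; infer_instance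

-- ===== CLAIM (what is proved, stated in full; the proofs are below) =====
def Claim_equal_varint_size_py : Prop := ∀ (value : Int), Dom_varint_size_py value → Pre_varint_size_py value → Spec_varint_size_py value (varint_size_py value)

-- ===== LEMMAS AND PROOFS =====

theorem log2_eq_log (n : Nat) : Nat.log2 n = Nat.log 2 n := Nat.log2_eq_log_two

theorem log_div128 (n : Nat) (h : 128 ≤ n) : Nat.log 2 (n / 128) = Nat.log 2 n - 7 := by
  have e : n / 128 = n / 2 / 2 / 2 / 2 / 2 / 2 / 2 := by omega
  rw [e, Nat.log_div_base, Nat.log_div_base, Nat.log_div_base, Nat.log_div_base,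
      Nat.log_div_base, Nat.log_div_base, Nat.log_div_base]
  omega

theorem log_ge7 (n : Nat) (h : 128 ≤ n) : 7 ≤ Nat.log 2 n :=
  (Nat.le_log_iff_pow_le (by norm_num) (by omega)).mpr (by norm_num; omega)

theorem key (n : Nat) : ∀ s : Int, varintLoopA (n : Int) s = s - 1 + max 1 (((pyBitLength (n : Int) + 6) / 7 : Nat) : Int) := by
  induction n using Nat.strong_induction_on with
  | _ n ih =>
    intro s
    by_cases h : 128 ≤ n
    · have hcast : ((n : Int) / 128) = ((n / 128 : Nat) : Int) := by
        exact (Int.natCast_div n 128).symm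
      rw [varintLoopA, if_pos (by exact_mod_cast h), hcast,
          ih (n / 128) (by omega)]
      have hb : pyBitLength (n : Int) = pyBitLength ((n / 128 : Nat) : Int) + 7 := by
        simp only [pyBitLength, Int.toNat_natCast]
        have h1 : ¬ n = 0 := by omega
        have h2 : ¬ n / 128 = 0 := by omega
        rw [if_neg h1, if_neg h2, log2_eq_log, log2_eq_log, log_div128 n h]
        have := log_ge7 n h
        omega
      have hpos : 1 ≤ pyBitLength ((n / 128 : Nat) : Int) := by
        simp only [pyBitLength, Int.toNat_natCast]
        rw [if_neg (by omega)]
        omega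
      rw [hb]
      have e1 : (pyBitLength ((n / 128 : Nat) : Int) + 7 + 6) / 7
              = (pyBitLength ((n / 128 : Nat) : Int) + 6) / 7 + 1 := by omega
      rw [e1]
      have e2 : max 1 ((((pyBitLength ((n / 128 : Nat) : Int) + 6) / 7 + 1 : Nat)) : Int)
              = (((pyBitLength ((n / 128 : Nat) : Int) + 6) / 7 + 1 : Nat) : Int) := by
        rw [max_eq_right]; exact_mod_cast Nat.le_add_left 1 _
      have e3 : max 1 ((((pyBitLength ((n / 128 : Nat) : Int) + 6) / 7 : Nat)) : Int)
              = (((pyBitLength ((n / 128 : Nat) : Int) + 6) / 7 : Nat) : Int) := by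
        rw [max_eq_right]; exact_mod_cast (by omega : 1 ≤ (pyBitLength ((n / 128 : Nat) : Int) + 6) / 7)
      rw [e2, e3]
      push_cast
      ring
    · rw [varintLoopA, if_neg (by exact_mod_cast h)]
      have hsmall : (pyBitLength (n : Int) + 6) / 7 ≤ 1 := by
        simp only [pyBitLength, Int.toNat_natCast]
        by_cases h0 : n = 0
        · rw [if_pos h0]; norm_num
        · rw [if_neg h0]
          have : Nat.log2 n ≤ 6 := by
            rw [log2_eq_log]
            by_contra hc
            have h7 : 2 ^ 7 ≤ n := (Nat.le_log_iff_pow_le (b := 2) (by norm_num) h0).mp (by omega)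
            norm_num at h7
            omega
          omega
      have : max 1 (((pyBitLength (n : Int) + 6) / 7 : Nat) : Int) = 1 := by
        rw [max_eq_left]; exact_mod_cast hsmall
      rw [this]; ring

-- ===== VERDICT (by name: the statement is the Claim_ definition above) =====
theorem varint_size_py_spec : Claim_equal_varint_size_py := by
  intro value _ hpre
  have hv : value = ((value.toNat : Nat) : Int) := (Int.toNat_of_nonneg hpre).symm
  unfold Spec_varint_size_py varint_size_py varint_size_py_alt
  rw [hv, key value.toNat 1]
  ring
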